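-- pv_equiv track=rewrite | github.com/HaydenInEdinburgh/LintCode | 331_confusing_number.py | check
-- ===== SOURCE A (Python) =====
-- R_CHAR = {'1':'1', '0':'0', '6':'9', '8': '8', '9':'6'}
--
-- def check(num, confusions, k):
--     num_string = str(num)
--     reverse = ''
--     if num_string[-1] == '0':
--         return
--     for i, char in enumerate(num_string):
--         if char not in R_CHAR:
--             return
--         reverse += R_CHAR[char]
--     r_num = int(reverse[::-1])
--     return r_num if r_num > num else None
-- ===== SOURCE B (Python) =====
-- ROT = {0: 0, 1: 1, 6: 9, 8: 8, 9: 6}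
--
-- def check(num, confusions, k):
--     if num <= 0:
--         return None
--     r, n = 0, num
--     while n > 0:
--         d = n % 10
--         if d not in ROT:
--             return None
--         r = r * 10 + ROT[d]
--         n //= 10
--     return r if r > num else None
-- ===== Notes on version B (the rewrite author's own statement) =====
-- stated objective: alternative
-- what changed: B replaces A's string pipeline (str(num), per-character dict of chars, string reversal, int()) by a pure integer loop that peels digits with % 10 and // 10 and accumulates the rotated value arithmetically, with sign/zero guards instead of character checks.
import Mathlib
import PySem

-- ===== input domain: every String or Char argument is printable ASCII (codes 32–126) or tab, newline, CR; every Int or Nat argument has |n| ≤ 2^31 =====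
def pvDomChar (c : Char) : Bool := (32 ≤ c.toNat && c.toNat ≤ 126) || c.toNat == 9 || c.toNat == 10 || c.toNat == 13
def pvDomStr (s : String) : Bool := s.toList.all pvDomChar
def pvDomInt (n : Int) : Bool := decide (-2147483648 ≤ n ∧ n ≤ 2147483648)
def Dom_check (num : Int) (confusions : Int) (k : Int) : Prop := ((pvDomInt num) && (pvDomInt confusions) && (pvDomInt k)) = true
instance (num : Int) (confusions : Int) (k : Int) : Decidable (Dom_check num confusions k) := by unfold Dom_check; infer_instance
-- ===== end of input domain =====

-- B replaces A's string pipeline by a pure integer digit-peeling loop (alternative decomposition, same O(d) cost).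
-- ===== PORT A =====
def rCharD : PySem.Dict Char Char :=
  PySem.Dict.ofList [('1', '1'), ('0', '0'), ('6', '9'), ('8', '8'), ('9', '6')]

-- the `for i, char in enumerate(num_string)` loop building `reverse`, with the early `return`
def checkLoop : List (Int × Char) → List Char → Option (List Char)
  | [], rev => some rev
  | (_, ch) :: rest, rev =>
    match rCharD.get? ch with
    | none => none
    | some mc => checkLoop rest (rev ++ [mc])

def check (num : Int) (confusions : Int) (k : Int) : Option Int :=
  let numString := PySem.Int.toChars num
  match PySem.List.pyGet? numString (-1) with
  | none => none   -- unreachable: str(num) is never empty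
  | some lastc =>
    if lastc = '0' then none
    else
      match checkLoop (PySem.List.enumerate numString) [] with
      | none => none
      | some rev =>
        match PySem.List.slice? rev none none (-1) with
        | none => none   -- unreachable: step is -1
        | some revd =>
          match PySem.Int.ofChars? revd with
          | none => none   -- unreachable: int() on a nonempty digit string
          | some r => if r > num then some r else none

-- ===== PORT B =====
def rotD : PySem.Dict Int Int :=
  PySem.Dict.ofList [(0, 0), (1, 1), (6, 9), (8, 8), (9, 6)]

def rotLoop (n : Int) (r : Int) : Option Int :=
  if h : 0 < n then
    match rotD.get? (PySem.Int.mod n 10) with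
    | none => none
    | some d => rotLoop (PySem.Int.floordiv n 10) (r * 10 + d)
  else some r
termination_by n.toNat
decreasing_by
  rw [PySem.Int.floordiv_eq_ediv_of_pos (by norm_num)]
  omega

def check_alt (num : Int) (confusions : Int) (k : Int) : Option Int :=
  if num ≤ 0 then none
  else
    match rotLoop num 0 with
    | none => none
    | some r => if r > num then some r else none

-- ===== PRECONDITION & SPEC =====
def Spec_check (num : Int) (confusions : Int) (k : Int) (out : Option Int) : Prop := out = check_alt num confusions k
instance (num : Int) (confusions : Int) (k : Int) (out : Option Int) : Decidable (Spec_check num confusions k out) := by unfold Spec_check; infer_instance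

-- ===== CLAIM (what is proved, stated in full; the proofs are below) =====
def Claim_equal_check : Prop := ∀ (num : Int) (confusions : Int) (k : Int), Dom_check num confusions k → Spec_check num confusions k (check num confusions k)

-- ===== LEMMAS AND PROOFS =====

theorem tdc_append (b : Nat) : ∀ (f n : Nat) (ds : List Char),
    Nat.toDigitsCore b f n ds = Nat.toDigitsCore b f n [] ++ ds := by
  intro f
  induction f with
  | zero => intro n ds; simp [Nat.toDigitsCore]
  | succ f ih =>
    intro n ds
    simp only [Nat.toDigitsCore]
    by_cases h : n / b = 0
    · simp [h]
    · simp only [if_neg h]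
      rw [ih (n / b) (Nat.digitChar (n % b) :: ds), ih (n / b) [Nat.digitChar (n % b)]]
      simp

theorem tdc_fuel : ∀ (n f g : Nat) (acc : List Char), n < 10 ^ f → n < 10 ^ g → 0 < f → 0 < g →
    Nat.toDigitsCore 10 f n acc = Nat.toDigitsCore 10 g n acc := by
  intro n
  induction n using Nat.strong_induction_on with
  | _ n ih =>
    intro f g acc hf hg hf0 hg0
    obtain ⟨f, rfl⟩ := Nat.exists_eq_succ_of_ne_zero (Nat.pos_iff_ne_zero.mp hf0)
    obtain ⟨g, rfl⟩ := Nat.exists_eq_succ_of_ne_zero (Nat.pos_iff_ne_zero.mp hg0)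
    simp only [Nat.toDigitsCore]
    by_cases h : n / 10 = 0
    · simp [h]
    · simp only [if_neg h]
      have hn10 : 10 ≤ n := by
        by_contra hc
        exact h (Nat.div_eq_of_lt (by omega))
      have hlt : n / 10 < n := Nat.div_lt_self (by omega) (by norm_num)
      have hf' : n / 10 < 10 ^ f := by
        have : n < 10 ^ (f + 1) := hf
        rw [pow_succ] at this
        omega
      have hg' : n / 10 < 10 ^ g := by
        have : n < 10 ^ (g + 1) := hg
        rw [pow_succ] at this
        omega
      have hfp : 0 < f := by
        rcases Nat.eq_zero_or_pos f with rfl | h'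
        · simp at hf'; omega
        · exact h'
      have hgp : 0 < g := by
        rcases Nat.eq_zero_or_pos g with rfl | h'
        · simp at hg'; omega
        · exact h'
      exact ih (n / 10) hlt f g _ hf' hg' hfp hgp

theorem toDigits_lt (n : Nat) (h : n < 10) : Nat.toDigits 10 n = [Nat.digitChar n] := by
  simp [Nat.toDigits, Nat.toDigitsCore, Nat.div_eq_of_lt h, Nat.mod_eq_of_lt h]

theorem toDigits_ge (n : Nat) (h : 10 ≤ n) :
    Nat.toDigits 10 n = Nat.toDigits 10 (n / 10) ++ [Nat.digitChar (n % 10)] := by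
  have h1 : ¬ n / 10 = 0 := by omega
  have hp : ∀ m : Nat, m < 10 ^ m := fun m => Nat.lt_pow_self (by norm_num)
  calc Nat.toDigits 10 n = Nat.toDigitsCore 10 (n + 1) n [] := rfl
    _ = Nat.toDigitsCore 10 n (n / 10) [Nat.digitChar (n % 10)] := by
          simp only [Nat.toDigitsCore]; rw [if_neg h1]
    _ = Nat.toDigitsCore 10 n (n / 10) [] ++ [Nat.digitChar (n % 10)] := tdc_append _ _ _ _
    _ = Nat.toDigitsCore 10 (n / 10 + 1) (n / 10) [] ++ [Nat.digitChar (n % 10)] := by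
          rw [tdc_fuel (n / 10) n (n / 10 + 1) []
            (lt_of_lt_of_le (Nat.div_lt_self (by omega) (by norm_num)) (le_of_lt (hp n)))
            (lt_of_lt_of_le (hp (n / 10)) (Nat.pow_le_pow_right (by norm_num) (by omega)))
            (by omega) (by omega)]
    _ = Nat.toDigits 10 (n / 10) ++ [Nat.digitChar (n % 10)] := rfl

theorem toDigits_ne_nil (n : Nat) : Nat.toDigits 10 n ≠ [] := by
  rcases Nat.lt_or_ge n 10 with h | h
  · rw [toDigits_lt n h]; simp
  · rw [toDigits_ge n h]; simp

theorem pyGet_last (n : Nat) :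
    PySem.List.pyGet? (Nat.toDigits 10 n) (-1) = some (Nat.digitChar (n % 10)) := by
  rcases Nat.lt_or_ge n 10 with h | h
  · rw [toDigits_lt n h, Nat.mod_eq_of_lt h,
      show [Nat.digitChar n] = [] ++ [Nat.digitChar n] from rfl, PySem.List.pyGet?_neg_one]
    simp
  · rw [toDigits_ge n h, PySem.List.pyGet?_neg_one]
    simp

def parseWith (dv : List Char → Option Nat) (s : List Char) : Option Int :=
  match ((s.dropWhile PySem.Int.isIntSpace).reverse.dropWhile PySem.Int.isIntSpace).reverse with
  | '-' :: ds => Option.map (fun n => -n) (do let a ← dv ds; pure ↑a)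
  | '+' :: ds => Option.map (fun n => n) (do let a ← dv ds; pure ↑a)
  | ds => Option.map (fun n => n) (do let a ← dv ds; pure ↑a)

theorem parser_spec : ∃ (dv : List Char → Option Nat) (g : List Char → Bool → Nat → Option Nat),
    (PySem.Int.ofChars? = parseWith dv) ∧
    (dv = fun cs => match cs with | [] => none | cs => g cs false 0) ∧
    (∀ b acc, g [] b acc = if b then some acc else none) ∧
    (∀ c rest b acc, g (c :: rest) b acc =
      if c.isDigit then g rest true (acc * 10 + (c.toNat - '0'.toNat))
      else if c = '_' ∧ b = true then
        (match rest with | d :: _ => if d.isDigit then g rest false acc else none | [] => none)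
      else none) := by
  refine ⟨?dv, ?g, ?h1, ?h2, ?h3, ?h4⟩
  case h1 => exact rfl
  case h2 => exact rfl
  case h3 => intro b acc; rfl
  case h4 => intro c rest b acc; rfl

theorem digit_not_space (c : Char) (h : c.isDigit = true) : PySem.Int.isIntSpace c = false := by
  cases heq : PySem.Int.isIntSpace c with
  | false => rfl
  | true =>
    exfalso
    simp only [PySem.Int.isIntSpace, Bool.or_eq_true, decide_eq_true_eq] at heq
    rcases heq with ((((h1 | h1) | h1) | h1) | h1) | h1 <;> subst h1 <;> simp [Char.isDigit] at h

theorem dropWhile_all_digit (l : List Char) (h : ∀ c ∈ l, c.isDigit = true) :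
    l.dropWhile PySem.Int.isIntSpace = l := by
  cases l with
  | nil => rfl
  | cons c rest =>
    rw [List.dropWhile_cons_of_neg]
    simp [digit_not_space c (h c (by simp))]

theorem ofChars?_digits (ds : List Char) (hne : ds ≠ []) (hd : ∀ c ∈ ds, c.isDigit = true) :
    PySem.Int.ofChars? ds = some ↑(ds.foldl (fun (a : Nat) (c : Char) => a * 10 + (c.toNat - 48)) 0) := by
  obtain ⟨dv, g, h1, h2, h3, h4⟩ := parser_spec
  have gTrue : ∀ (l : List Char) (acc : Nat), (∀ c ∈ l, c.isDigit = true) →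
      g l true acc = some (l.foldl (fun a c => a * 10 + (c.toNat - 48)) acc) := by
    intro l
    induction l with
    | nil => intro acc _; simp [h3]
    | cons c rest ih =>
      intro acc hl
      rw [h4, if_pos (hl c (by simp))]
      rw [List.foldl_cons]
      exact ih _ (fun x hx => hl x (by simp [hx]))
  cases ds with
  | nil => exact absurd rfl hne
  | cons c rest =>
    have hdrop1 : (c :: rest).dropWhile PySem.Int.isIntSpace = c :: rest :=
      dropWhile_all_digit _ hd
    have hdrop2 : (c :: rest).reverse.dropWhile PySem.Int.isIntSpace = (c :: rest).reverse := by
      apply dropWhile_all_digit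
      intro x hx
      exact hd x (List.mem_reverse.mp hx)
    rw [h1]
    unfold parseWith
    rw [hdrop1, hdrop2, List.reverse_reverse]
    have hc : c.isDigit = true := hd c (by simp)
    have hdv : dv (c :: rest) = some ((c :: rest).foldl (fun a c => a * 10 + (c.toNat - 48)) 0) := by
      rw [h2]
      show g (c :: rest) false 0 = _
      rw [h4, if_pos hc]
      rw [gTrue rest _ (fun x hx => hd x (by simp [hx]))]
      simp [List.foldl_cons]
    split
    · rename_i ds' heq
      exfalso
      rw [List.cons.injEq] at heq
      have := hc; rw [heq.1] at this; simp [Char.isDigit] at this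
    · rename_i ds' heq
      exfalso
      rw [List.cons.injEq] at heq
      have := hc; rw [heq.1] at this; simp [Char.isDigit] at this
    · rw [hdv]
      rfl

def mchar (c : Char) : Char := (rCharD.get? c).getD c

theorem checkLoop_eq : ∀ (cs : List Char) (s : Int) (rev : List Char),
    checkLoop (PySem.List.enumerate cs s) rev =
      if cs.all (fun c => (rCharD.get? c).isSome) then some (rev ++ cs.map mchar) else none := by
  intro cs
  induction cs with
  | nil => intro s rev; simp [PySem.List.enumerate_nil, checkLoop]
  | cons c rest ih =>
    intro s rev
    rw [PySem.List.enumerate_cons]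
    show checkLoop ((s, c) :: PySem.List.enumerate rest (s + 1)) rev = _
    cases hg : rCharD.get? c with
    | none =>
      simp [checkLoop, hg]
    | some mc =>
      simp only [checkLoop, hg, ih (s + 1) (rev ++ [mc]), List.all_cons, List.map_cons]
      have hmc : mchar c = mc := by simp [mchar, hg]
      by_cases hall : rest.all (fun c => (rCharD.get? c).isSome) = true
      · simp [hall, hmc]
      · simp [hall]

-- B-side digit consumer over big-endian digit chars, consumed from the right (via reverse)
def auxRot : List Char → Int → Option Int
  | [], r => some r
  | c :: rest, r =>
    match rCharD.get? c with
    | none => none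
    | some mc => auxRot rest (r * 10 + ((mc.toNat - 48 : Nat) : Int))

theorem rotD_eq : rotD = PySem.Dict.mk [(0, 0), (1, 1), (6, 9), (8, 8), (9, 6)] := by decide

theorem digitCorr (m : Nat) (hm : m < 10) :
    rotD.get? (m : Int) = (rCharD.get? (Nat.digitChar m)).map (fun mc => ((mc.toNat - 48 : Nat) : Int)) := by
  interval_cases m <;> decide

theorem rotLoop_pos (n r : Int) (h : 0 < n) :
    rotLoop n r = match rotD.get? (PySem.Int.mod n 10) with
      | none => none
      | some d => rotLoop (PySem.Int.floordiv n 10) (r * 10 + d) := by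
  rw [rotLoop, dif_pos h]

theorem rotLoop_nonpos (n r : Int) (h : ¬ 0 < n) : rotLoop n r = some r := by
  rw [rotLoop, dif_neg h]

theorem rotLoop_eq_aux : ∀ (n : Nat), 0 < n → ∀ r : Int,
    rotLoop (n : Int) r = auxRot (Nat.toDigits 10 n).reverse r := by
  intro n
  induction n using Nat.strong_induction_on with
  | _ n ih =>
    intro hn r
    rw [rotLoop_pos _ _ (by exact_mod_cast hn)]
    rcases Nat.lt_or_ge n 10 with h10 | h10
    · rw [toDigits_lt n h10]
      have hmod : PySem.Int.mod (n : Int) 10 = ((n % 10 : Nat) : Int) := by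
        exact_mod_cast PySem.Int.mod_natCast n 10
      rw [hmod, Nat.mod_eq_of_lt h10, digitCorr n h10]
      show _ = auxRot [Nat.digitChar n] r
      cases hg : rCharD.get? (Nat.digitChar n) with
      | none => simp [auxRot, hg]
      | some mc =>
        simp only [hg, Option.map_some, auxRot]
        have hfd : PySem.Int.floordiv (n : Int) 10 = ((n / 10 : Nat) : Int) := by
          exact_mod_cast PySem.Int.floordiv_natCast n 10
        rw [rotLoop_nonpos _ _ (by rw [hfd, Nat.div_eq_of_lt h10]; norm_num)]
    · rw [toDigits_ge n h10, List.reverse_append]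
      show _ = auxRot (Nat.digitChar (n % 10) :: (Nat.toDigits 10 (n / 10)).reverse) r
      have hmod : PySem.Int.mod (n : Int) 10 = ((n % 10 : Nat) : Int) := by
        exact_mod_cast PySem.Int.mod_natCast n 10
      rw [hmod, digitCorr (n % 10) (Nat.mod_lt n (by norm_num))]
      cases hg : rCharD.get? (Nat.digitChar (n % 10)) with
      | none => simp [auxRot, hg]
      | some mc =>
        simp only [hg, Option.map_some, auxRot]
        have hdiv : PySem.Int.floordiv (n : Int) 10 = ((n / 10 : Nat) : Int) := by
          exact_mod_cast PySem.Int.floordiv_natCast n 10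
        rw [hdiv]
        exact ih (n / 10) (Nat.div_lt_self (by omega) (by norm_num)) (by omega) _

theorem auxRot_all (l : List Char) (r : Int) (h : ∀ c ∈ l, (rCharD.get? c).isSome = true) :
    auxRot l r = some (l.foldl (fun (a : Int) (c : Char) => a * 10 + (((mchar c).toNat - 48 : Nat) : Int)) r) := by
  induction l generalizing r with
  | nil => simp [auxRot]
  | cons c rest ih =>
    cases hg : rCharD.get? c with
    | none => exact absurd (h c (by simp)) (by simp [hg])
    | some mc =>
      simp only [auxRot, hg, List.foldl_cons]
      rw [ih _ (fun x hx => h x (by simp [hx]))]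
      simp [mchar, hg]

theorem auxRot_none (l : List Char) (r : Int) (h : ¬ ∀ c ∈ l, (rCharD.get? c).isSome = true) :
    auxRot l r = none := by
  induction l generalizing r with
  | nil => exact absurd (by simp) h
  | cons c rest ih =>
    cases hg : rCharD.get? c with
    | none => simp [auxRot, hg]
    | some mc =>
      simp only [auxRot, hg]
      apply ih
      intro hall
      apply h
      intro x hx
      rcases List.mem_cons.mp hx with rfl | hx'
      · simp [hg]
      · exact hall x hx'

theorem foldl_cast (l : List Char) (f : Char → Nat) : ∀ (a : Nat),
    ((l.foldl (fun (x : Nat) (c : Char) => x * 10 + f c) a : Nat) : Int)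
      = l.foldl (fun (x : Int) (c : Char) => x * 10 + (f c : Int)) (a : Int) := by
  induction l with
  | nil => intro a; simp
  | cons c rest ih =>
    intro a
    simp only [List.foldl_cons]
    rw [ih]
    congr 1

theorem rCharD_eq : rCharD = PySem.Dict.mk [('1', '1'), ('0', '0'), ('6', '9'), ('8', '8'), ('9', '6')] := by
  decide

theorem rChar_cases (c : Char) (h : (rCharD.get? c).isSome = true) :
    c = '1' ∨ c = '0' ∨ c = '6' ∨ c = '8' ∨ c = '9' := by
  rw [rCharD_eq] at h
  simp only [PySem.Dict.get?_mk_cons, beq_iff_eq] at h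
  split_ifs at h with h1 h2 h3 h4 h5
  · exact Or.inl h1.symm
  · exact Or.inr (Or.inl h2.symm)
  · exact Or.inr (Or.inr (Or.inl h3.symm))
  · exact Or.inr (Or.inr (Or.inr (Or.inl h4.symm)))
  · exact Or.inr (Or.inr (Or.inr (Or.inr h5.symm)))
  · simp [PySem.Dict.get?] at h

theorem mapped_isDigit (c : Char) (h : (rCharD.get? c).isSome = true) : (mchar c).isDigit = true := by
  rcases rChar_cases c h with rfl | rfl | rfl | rfl | rfl <;> decide

theorem rotD_some_bound (d v : Int) (h : rotD.get? d = some v) : 0 ≤ v ∧ v ≤ 9 := by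
  rw [rotD_eq] at h
  simp only [PySem.Dict.get?_mk_cons, beq_iff_eq] at h
  split_ifs at h with h1 h2 h3 h4 h5 <;>
    first
    | (injection h with hv; omega)
    | simp [PySem.Dict.get?] at h

theorem rotLoop_bound : ∀ (k : Nat) (n r0 : Int), 0 ≤ n → 0 ≤ r0 → n.toNat < 10 ^ k →
    ∀ r, rotLoop n r0 = some r → r < (r0 + 1) * 10 ^ k := by
  intro k
  induction k with
  | zero =>
    intro n r0 hn hr0 hlt r hr
    rw [rotLoop_nonpos _ _ (by omega)] at hr
    injection hr with hr
    subst hr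
    have h10 : ((10:Int)) ^ (0:Nat) = 1 := pow_zero 10
    omega
  | succ k ih =>
    intro n r0 hn hr0 hlt r hr
    by_cases h0 : 0 < n
    · rw [rotLoop_pos _ _ h0] at hr
      cases hg : rotD.get? (PySem.Int.mod n 10) with
      | none => rw [hg] at hr; cases hr
      | some v =>
        rw [hg] at hr
        obtain ⟨hv0, hv9⟩ := rotD_some_bound _ _ hg
        have hfd : PySem.Int.floordiv n 10 = n / 10 :=
          PySem.Int.floordiv_eq_ediv_of_pos (by norm_num)
        rw [hfd] at hr
        have h1 : 0 ≤ n / 10 := Int.ediv_nonneg (by omega) (by norm_num)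
        have hps : (10:Nat) ^ (k + 1) = 10 * 10 ^ k := by rw [pow_succ]; ring
        have h2 : (n / 10).toNat < 10 ^ k := by
          rw [hps] at hlt
          omega
        have hrec := ih (n / 10) (r0 * 10 + v) h1 (by omega) h2 r hr
        have hpow : (0:Int) ≤ 10 ^ k := by positivity
        have hle : (r0 * 10 + v + 1) * 10 ^ k ≤ ((r0 + 1) * 10) * 10 ^ k :=
          mul_le_mul_of_nonneg_right (by omega) hpow
        have heq : ((r0 + 1) * 10) * 10 ^ k = (r0 + 1) * 10 ^ (k + 1) := by
          rw [pow_succ]; ring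
        omega
    · rw [rotLoop_nonpos _ _ h0] at hr
      injection hr with hr
      subst hr
      have hone : (1:Int) ≤ 10 ^ (k + 1) := one_le_pow₀ (by norm_num)
      nlinarith

theorem digitChar_ne_zero (m : Nat) (hlt : m < 10) (hm : m ≠ 0) : Nat.digitChar m ≠ '0' := by
  interval_cases m <;> simp_all <;> decide

-- ===== VERDICT (by name: the statement is the Claim_ definition above) =====
theorem check_spec : Claim_equal_check := by
  intro num confusions k _
  unfold Spec_check check check_alt
  simp only [letFun]
  by_cases hneg : num < 0
  · -- negative numbers: both sides return none
    rw [if_pos (by omega : num ≤ 0)]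
    have htc : PySem.Int.toChars num = '-' :: Nat.toDigits 10 num.natAbs := by
      simp [PySem.Int.toChars, hneg]
    have hnn : Nat.toDigits 10 num.natAbs ≠ [] := toDigits_ne_nil _
    obtain ⟨ys, y, hys⟩ := (List.eq_nil_or_concat (Nat.toDigits 10 num.natAbs)).resolve_left hnn
    rw [List.concat_eq_append] at hys
    rw [htc, hys, PySem.List.pyGet?_neg_one,
      show ('-' :: (ys ++ [y])).getLast? = some y from by
        rw [show ('-' :: (ys ++ [y])) = ('-' :: ys) ++ [y] from rfl, List.getLast?_append_cons]
        rfl]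
    try dsimp only
    by_cases hy : y = '0'
    · rw [if_pos hy]
    · rw [if_neg hy, PySem.List.enumerate_cons,
        show checkLoop ((0, '-') :: PySem.List.enumerate (ys ++ [y]) (0 + 1)) [] = none from by
          simp [checkLoop, show rCharD.get? '-' = none from by decide]]
  · by_cases hzero : num = 0
    · subst hzero; rfl
    · -- positive numbers
      have hpos : 0 < num := by omega
      have hnum : num = ((num.toNat : Nat) : Int) := by omega
      set n : Nat := num.toNat with hn
      have hnpos : 0 < n := by omega
      have htc : PySem.Int.toChars num = Nat.toDigits 10 n := by
        unfold PySem.Int.toChars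
        rw [if_neg (by omega)]
      set cs : List Char := Nat.toDigits 10 n with hcs
      try dsimp only
      rw [htc, pyGet_last n]
      try dsimp only
      rw [if_neg (by omega : ¬ num ≤ 0)]
      by_cases hmod : n % 10 = 0
      · -- trailing zero: A fails the guard, B's rotation is too small
        rw [if_pos (by rw [hmod]; rfl)]
        have h10n : 10 ≤ n := by omega
        rw [hnum, rotLoop_pos _ _ (by exact_mod_cast hnpos)]
        have hmodc : PySem.Int.mod ((n : Nat) : Int) 10 = ((n % 10 : Nat) : Int) := by
          exact_mod_cast PySem.Int.mod_natCast n 10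
        rw [hmodc, hmod]
        rw [show rotD.get? ((0 : Nat) : Int) = some 0 from by decide]
        try dsimp only
        have hdivc : PySem.Int.floordiv ((n : Nat) : Int) 10 = ((n / 10 : Nat) : Int) := by
          exact_mod_cast PySem.Int.floordiv_natCast n 10
        rw [hdivc]
        cases hr : rotLoop ((n / 10 : Nat) : Int) (0 * 10 + 0) with
        | none => rfl
        | some r =>
          try dsimp only
          have hlog1 : n / 10 < 10 ^ Nat.log 10 n := by
            have := Nat.lt_pow_succ_log_self (by norm_num : 1 < 10) n
            rw [pow_succ] at this
            omega
          have hlog2 : 10 ^ Nat.log 10 n ≤ n := Nat.pow_log_le_self 10 (by omega)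
          have hb := rotLoop_bound (Nat.log 10 n) ((n / 10 : Nat) : Int) (0 * 10 + 0)
            (by positivity) (by norm_num) (by omega) r hr
          have hle : ((10 : Int)) ^ Nat.log 10 n ≤ ((n : Nat) : Int) := by
            exact_mod_cast hlog2
          rw [if_neg (by omega : ¬ r > ((n : Nat) : Int))]
      · -- last digit nonzero
        rw [if_neg (digitChar_ne_zero (n % 10) (Nat.mod_lt n (by norm_num)) hmod)]
        rw [checkLoop_eq cs 0 []]
        have hcsne : cs ≠ [] := toDigits_ne_nil _
        by_cases hall : cs.all (fun c => (rCharD.get? c).isSome) = true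
        · rw [if_pos hall, List.nil_append]
          try dsimp only
          rw [PySem.List.slice?_none_none_neg_one]
          try dsimp only
          have hmapne : (cs.map mchar).reverse ≠ [] := by
            simp [hcsne]
          have hmapdig : ∀ c ∈ (cs.map mchar).reverse, c.isDigit = true := by
            intro c hc
            rw [List.mem_reverse] at hc
            obtain ⟨x, hx, rfl⟩ := List.mem_map.mp hc
            exact mapped_isDigit x (by
              have := List.all_eq_true.mp hall x hx
              simpa using this)
          rw [ofChars?_digits _ hmapne hmapdig]
          try dsimp only
          -- B side
          rw [hnum, rotLoop_eq_aux n hnpos 0]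
          have hallrev : ∀ c ∈ cs.reverse, (rCharD.get? c).isSome = true := by
            intro c hc
            have := List.all_eq_true.mp hall c (List.mem_reverse.mp hc)
            simpa using this
          rw [auxRot_all _ _ hallrev]
          have hval : (((cs.map mchar).reverse.foldl (fun (a : Nat) (c : Char) => a * 10 + (c.toNat - 48)) 0 : Nat) : Int)
              = cs.reverse.foldl (fun (a : Int) (c : Char) => a * 10 + (((mchar c).toNat - 48 : Nat) : Int)) 0 := by
            rw [← List.map_reverse, List.foldl_map, foldl_cast cs.reverse (fun c => (mchar c).toNat - 48) 0]
            norm_num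
          rw [hval]
        · rw [if_neg hall]
          rw [hnum, rotLoop_eq_aux n hnpos 0]
          rw [auxRot_none _ _ (by
            intro hclaim
            apply hall
            rw [List.all_eq_true]
            intro x hx
            simpa using hclaim x (List.mem_reverse.mpr hx))]
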